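-- pv_equiv track=rewrite | github.com/regouga/IA-1P-3A1S-1718 | proj1_g44.py | compactH
-- ===== SOURCE A (Python) =====
-- def get_collumn(board, collumn):			# Obtencao de uma coluna
--        col = []
--        for line in board:
--               col.append(line[collumn])
--        return col
--
-- def number_collumns(board): 				# Numero de colunas do tabuleiro
--        return len(board[0])
--
-- def number_lines(board): 					# Numero de linhas do tabuleiro
--        return len(board)
--
-- def has_only_zeros(listAnnalise): 			# Verificacao se so tem zeros
--        for color in listAnnalise:
--               if color != 0:
--                      return False
--        return True
--
-- def compactH(board, empty_col): 				# Compatcacao horizontal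
--        nCollumns = number_collumns(board)
--        newBoardCollumn = []
--        nLines = number_lines(board)
--        auxCol = [0]*nLines
--        aux = 0
--        for i in range(0, nCollumns):
--               col = get_collumn(board, i)
--               if has_only_zeros(col):
--                      aux +=1
--               else:
--                      newBoardCollumn.append(col)
--        for i in range(0,aux):
--               newBoardCollumn.append(auxCol)
--        newFinal = []
--        for l in range(0, nLines):
--               line =[]
--               for c in range(0, nCollumns):
--                      line.append(newBoardCollumn[c][l])
--               newFinal.append(line)
--        return newFinal
-- ===== SOURCE B (Python) =====
-- def compactH(board, empty_col):
--     # mask-first, row-wise rebuild: find non-all-zero columns once, then build each row directly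
--     width = len(board[0])
--     keep = [c for c in range(width) if any(row[c] != 0 for row in board)]
--     num_zero = width - len(keep)
--     return [[row[c] for c in keep] + [0] * num_zero for row in board]
-- ===== Notes on version B (the rewrite author's own statement) =====
-- stated objective: simpler
-- what changed: B replaces A's build-columns-then-append-zero-columns-then-transpose-by-index pipeline with a single column mask (indices of non-zero columns) and a direct row-by-row rebuild, never materialising columns or transposing (measured constant-factor speedup).
import Mathlib
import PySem

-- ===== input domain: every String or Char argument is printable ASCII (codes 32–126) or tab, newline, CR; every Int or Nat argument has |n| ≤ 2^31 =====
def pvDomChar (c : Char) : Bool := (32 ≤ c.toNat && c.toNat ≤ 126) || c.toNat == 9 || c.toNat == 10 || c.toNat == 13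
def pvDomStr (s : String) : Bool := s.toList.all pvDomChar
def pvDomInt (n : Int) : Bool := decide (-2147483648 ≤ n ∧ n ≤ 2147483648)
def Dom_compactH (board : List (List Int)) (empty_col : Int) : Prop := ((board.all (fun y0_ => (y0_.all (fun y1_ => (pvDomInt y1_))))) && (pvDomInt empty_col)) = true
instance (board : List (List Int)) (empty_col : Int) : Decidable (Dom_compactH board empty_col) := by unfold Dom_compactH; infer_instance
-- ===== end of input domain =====

-- B replaces A's build-columns/append-zero-columns/transpose pipeline with a column mask and a
-- direct row-by-row rebuild (objective: simpler; empty_col is ignored, exactly as in A).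


-- ===== PORT A =====
def getCollumn (board : List (List Int)) (c : Nat) : List Int :=
  board.foldl (fun col line => col ++ [line.getD c 0]) []

def hasOnlyZeros : List Int → Bool
  | [] => true
  | color :: rest => if color ≠ 0 then false else hasOnlyZeros rest

def compactH (board : List (List Int)) (empty_col : Int) : List (List Int) :=
  let nCollumns := (board.headD []).length
  let nLines := board.length
  let auxCol := List.replicate nLines (0 : Int)
  let p := (List.range nCollumns).foldl (fun (s : Nat × List (List Int)) i =>
    let col := getCollumn board i
    if hasOnlyZeros col then (s.1 + 1, s.2) else (s.1, s.2 ++ [col])) (0, [])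
  let newBoardCollumn := (List.range p.1).foldl (fun acc _ => acc ++ [auxCol]) p.2
  (List.range nLines).foldl (fun acc l =>
    acc ++ [(List.range nCollumns).foldl
      (fun line c => line ++ [(newBoardCollumn.getD c []).getD l 0]) []]) []

-- ===== PORT B =====
def compactH_alt (board : List (List Int)) (empty_col : Int) : List (List Int) :=
  let width := (board.headD []).length
  let keep := (List.range width).filter (fun c => board.any (fun row => row.getD c 0 != 0))
  let numZero := width - keep.length
  board.map (fun row => keep.map (fun c => row.getD c 0) ++ List.replicate numZero 0)

-- ===== PRECONDITION & SPEC =====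
-- Pre_ excludes exactly the inputs on which the Python A raises IndexError: the empty board
-- (len(board[0])) and ragged boards where some row is shorter than the first row.
def Pre_compactH (board : List (List Int)) (empty_col : Int) : Prop :=
  board ≠ [] ∧ ∀ row ∈ board, (board.headD []).length ≤ row.length
instance (board : List (List Int)) (empty_col : Int) : Decidable (Pre_compactH board empty_col) := by
  unfold Pre_compactH; infer_instance
def pvWitness_compactH : List (List Int) × Int := ([[1, 0, 2], [0, 0, 3]], 0)

def Spec_compactH (board : List (List Int)) (empty_col : Int) (out : List (List Int)) : Prop :=
  out = compactH_alt board empty_col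
instance (board : List (List Int)) (empty_col : Int) (out : List (List Int)) : Decidable (Spec_compactH board empty_col out) := by
  unfold Spec_compactH; infer_instance

-- ===== CLAIM (what is proved, stated in full; the proofs are below) =====
def Claim_equal_compactH : Prop := ∀ (board : List (List Int)) (empty_col : Int), Dom_compactH board empty_col → Pre_compactH board empty_col → Spec_compactH board empty_col (compactH board empty_col)

-- ===== LEMMAS AND PROOFS =====

-- getCollumn is the c-th entry of every row
theorem getCollumn_eq_map (board : List (List Int)) (c : Nat) :
    getCollumn board c = board.map (fun line => line.getD c 0) := by
  simpa [getCollumn] using PySem.List.foldl_append_singleton_eq_map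
    (fun line : List Int => line.getD c 0) board []

theorem hasOnlyZeros_eq_all (l : List Int) : hasOnlyZeros l = l.all (fun x => x == 0) := by
  induction l with
  | nil => rfl
  | cons x t ih =>
    by_cases hx : x = 0 <;> simp [hasOnlyZeros, hx, ih]

-- the first loop of A: counts all-zero columns and collects the others, in order
theorem pairFold_eq (board : List (List Int)) :
    ∀ (L : List Nat) (a : Nat) (cs : List (List Int)),
    L.foldl (fun (s : Nat × List (List Int)) i =>
      let col := getCollumn board i
      if hasOnlyZeros col then (s.1 + 1, s.2) else (s.1, s.2 ++ [col])) (a, cs)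
      = (a + (L.filter (fun i => hasOnlyZeros (getCollumn board i))).length,
         cs ++ (L.filter (fun i => ! hasOnlyZeros (getCollumn board i))).map (getCollumn board)) := by
  intro L
  induction L with
  | nil => intro a cs; simp
  | cons i t ih =>
    intro a cs
    by_cases h : hasOnlyZeros (getCollumn board i) = true
    · simp [h, ih]; omega
    · simp [h, ih]

-- the second loop of A: append aux copies of the zero column
theorem replFold_eq {α : Type} (x : α) : ∀ (n : Nat) (init : List α),
    (List.range n).foldl (fun acc _ => acc ++ [x]) init = init ++ List.replicate n x := by
  intro n
  induction n with
  | zero => simp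
  | succ m ih =>
    intro init
    simp [List.range_succ, ih, List.replicate_succ']

theorem getD_replicate_zero (n l : Nat) : (List.replicate n (0 : Int)).getD l 0 = 0 := by
  simp [List.getD, List.getElem?_replicate]
  split <;> simp

-- B's column test equals the negation of A's all-zero test
theorem any_eq_not_hasOnlyZeros (board : List (List Int)) (c : Nat) :
    (board.any fun row => row.getD c 0 != 0) = !hasOnlyZeros (getCollumn board c) := by
  rw [getCollumn_eq_map, hasOnlyZeros_eq_all]
  induction board with
  | nil => rfl
  | cons r t ih =>
    simp only [List.map_cons, List.all_cons, List.any_cons, Bool.not_and, bne] at ih ⊢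
    rw [ih]

-- map over range-of-getD is just map over the list
theorem map_range_getD {α β : Type} (F : α → β) (cols : List α) (d : α) :
    (List.range cols.length).map (fun c => F (cols.getD c d)) = cols.map F := by
  apply List.ext_getElem
  · simp
  · intro i h1 h2
    simp at h1
    simp [List.getD, List.getElem?_eq_getElem h1]

-- ===== VERDICT (by name: the statement is the Claim_ definition above) =====
theorem compactH_spec : Claim_equal_compactH := by
  intro board e _hDom _hPre
  unfold Spec_compactH compactH compactH_alt
  simp only []
  set W := (board.headD []).length with hW
  set nL := board.length with hnL
  -- rewrite A's three loops
  rw [pairFold_eq, replFold_eq]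
  rw [PySem.List.foldl_append_singleton_eq_map]
  simp only [List.nil_append, Nat.zero_add, any_eq_not_hasOnlyZeros]
  set keep := (List.range W).filter (fun i => !hasOnlyZeros (getCollumn board i)) with hkeep
  set z := ((List.range W).filter (fun i => hasOnlyZeros (getCollumn board i))).length with hz
  have hlen : keep.length + z = W := by
    have h := List.length_eq_length_filter_add
      (l := List.range W) (fun i => !hasOnlyZeros (getCollumn board i))
    simp only [Bool.not_not] at h
    simp [hkeep, hz, h.symm]
  have hcols : (keep.map (getCollumn board) ++
      List.replicate z (List.replicate nL (0 : Int))).length = W := by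
    simp; omega
  apply List.ext_getElem
  case hl => simp; exact hnL
  case h =>
    intro l h1 h2
    simp only [List.getElem_map, List.getElem_range]
    rw [PySem.List.foldl_append_singleton_eq_map
      (fun c => (((keep.map (getCollumn board) ++
        List.replicate z (List.replicate nL (0 : Int))).getD c []).getD l 0))]
    rw [List.nil_append]
    conv_lhs => rw [← hcols]
    rw [map_range_getD (fun col => col.getD l 0)
      (keep.map (getCollumn board) ++ List.replicate z (List.replicate nL (0 : Int))) []]
    have hl : l < board.length := by simpa using h1
    simp only [List.map_append, List.map_map, List.map_replicate, getD_replicate_zero]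
    congr 1
    · apply List.map_congr_left
      intro k _
      simp [Function.comp, getCollumn_eq_map, List.getD, List.getElem?_map, List.getElem?_eq_getElem hl]
    · congr 1
      omega
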